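-- pv_equiv track=rewrite | github.com/aldragon-net/AoC | 2018/day05-2018/day05-2018.py | make_pass
-- ===== SOURCE A (Python) =====
-- def make_pass(polymer, exclude=''):
--     next = []
--     reduced = False
--     for char in polymer:
--         if char.lower() == exclude.lower():
--             continue
--         if next and next[-1] != char and next[-1].upper() == char.upper():
--             next.pop()
--             reduced = True
--         else:
--             next.append(char)
--     return reduced, next
-- ===== SOURCE B (Python) =====
-- def _remove_first_pair(units):
--     """Return units with the first reacting adjacent pair removed, or None if none."""
--     for i in range(len(units) - 1):
--         a, b = units[i], units[i + 1]
--         if a != b and a.upper() == b.upper():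
--             return units[:i] + units[i + 2:]
--     return None
--
--
-- def make_pass(polymer, exclude=''):
--     ex = exclude.lower()
--     units = [c for c in polymer if c.lower() != ex]
--     changed = False
--     while True:
--         nxt = _remove_first_pair(units)
--         if nxt is None:
--             return changed, units
--         changed = True
--         units = nxt
-- ===== Notes on version B (the rewrite author's own statement) =====
-- stated objective: alternative
-- what changed: A does one left-to-right stack pass with the exclude test interleaved; B first filters out the excluded unit, then repeatedly rescans the list removing the first reacting adjacent pair until a full scan finds none, deriving the flag from whether any scan removed a pair.
import Mathlib
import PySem

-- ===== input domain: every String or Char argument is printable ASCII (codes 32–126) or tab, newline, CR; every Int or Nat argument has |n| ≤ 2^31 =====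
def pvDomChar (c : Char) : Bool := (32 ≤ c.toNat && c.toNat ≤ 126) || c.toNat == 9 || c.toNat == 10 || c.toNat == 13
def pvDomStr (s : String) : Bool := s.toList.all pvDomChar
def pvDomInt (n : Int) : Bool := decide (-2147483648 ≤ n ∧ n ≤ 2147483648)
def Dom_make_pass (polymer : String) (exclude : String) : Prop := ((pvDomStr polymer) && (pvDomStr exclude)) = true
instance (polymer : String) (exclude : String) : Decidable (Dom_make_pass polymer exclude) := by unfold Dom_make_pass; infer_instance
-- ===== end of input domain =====

-- B replaces A's one-pass stack reduction by filter-first + naive repeated removal of the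
-- first reacting adjacent pair until a fixpoint (objective: alternative, not faster).

-- ===== PORT A =====
-- A: one left-to-right pass; `next` is a Python list used as a stack (append/pop at the END,
-- kept here in the same order: append = ++ [char], next[-1] = getLast?, pop = dropLast).
-- Characters of the string are carried as `Char` and wrapped back into 1-char strings at return;
-- `char.lower()`/`char.upper()` on a 1-char string are PySem.Chars.lower [c] / upperChar c (exact on Dom).
def make_pass (polymer : String) (exclude : String) : Bool × List String :=
  let exLower := PySem.Chars.lower exclude.toList
  let r := polymer.toList.foldl (fun (st : Bool × List Char) char =>
    if PySem.Chars.lower [char] == exLower then st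
    else
      match st.2.getLast? with
      | some last =>
        if last != char && (PySem.Chars.upperChar last == PySem.Chars.upperChar char) then
          (true, st.2.dropLast)
        else (st.1, st.2 ++ [char])
      | none => (st.1, st.2 ++ [char])) (false, [])
  (r.1, r.2.map (fun c => String.ofList [c]))

-- ===== PORT B =====
-- B helper `_remove_first_pair`: scan left-to-right, remove the FIRST reacting adjacent pair, none if no pair.
def pvScan1 : List Char → Option (List Char)
  | a :: b :: rest =>
    if a != b && (PySem.Chars.upperChar a == PySem.Chars.upperChar b) then some rest
    else (pvScan1 (b :: rest)).map (a :: ·)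
  | _ => none

-- termination measure for B's while-loop: each successful scan removes exactly two characters
theorem pvScan1_length : ∀ (l l' : List Char), pvScan1 l = some l' → l'.length + 2 = l.length := by
  intro l
  induction l with
  | nil => intro l' h; simp [pvScan1] at h
  | cons a tl ih =>
    intro l' h
    match tl with
    | [] => simp [pvScan1] at h
    | b :: rest =>
      rw [pvScan1] at h
      split at h
      · cases h; simp
      · simp only [Option.map_eq_some_iff] at h
        obtain ⟨m, hm, rfl⟩ := h
        have := ih m hm
        simp only [List.length_cons] at *
        omega

-- B's while-loop: repeat `_remove_first_pair` until it returns none, tracking `changed`.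
def pvLoop (changed : Bool) (units : List Char) : Bool × List Char :=
  match h : pvScan1 units with
  | some nxt => pvLoop true nxt
  | none => (changed, units)
termination_by units.length
decreasing_by have := pvScan1_length units nxt h; omega

def make_pass_alt (polymer : String) (exclude : String) : Bool × List String :=
  let ex := PySem.Chars.lower exclude.toList
  let units := polymer.toList.filter (fun c => PySem.Chars.lower [c] != ex)
  let r := pvLoop false units
  (r.1, r.2.map (fun c => String.ofList [c]))

-- ===== PRECONDITION & SPEC =====
def Spec_make_pass (polymer : String) (exclude : String) (out : Bool × List String) : Prop := out = make_pass_alt polymer exclude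
instance (polymer : String) (exclude : String) (out : Bool × List String) : Decidable (Spec_make_pass polymer exclude out) := by unfold Spec_make_pass; infer_instance

-- ===== CLAIM (what is proved, stated in full; the proofs are below) =====
def Claim_equal_make_pass : Prop := ∀ (polymer : String) (exclude : String), Dom_make_pass polymer exclude → Spec_make_pass polymer exclude (make_pass polymer exclude)

-- ===== LEMMAS AND PROOFS =====

-- the reaction test, shared by the proofs
def pvReact (a b : Char) : Bool := a != b && (PySem.Chars.upperChar a == PySem.Chars.upperChar b)

theorem pvReact_comm (a b : Char) : pvReact a b = pvReact b a := by
  by_cases h : a = b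
  · subst h; rfl
  · by_cases h2 : PySem.Chars.upperChar a = PySem.Chars.upperChar b
    · have f1 : (a == b) = false := beq_eq_false_iff_ne.mpr h
      have f2 : (b == a) = false := beq_eq_false_iff_ne.mpr (Ne.symm h)
      simp [pvReact, bne, f1, f2, h2]
    · have e1 : (PySem.Chars.upperChar a == PySem.Chars.upperChar b) = false :=
        beq_eq_false_iff_ne.mpr h2
      have e2 : (PySem.Chars.upperChar b == PySem.Chars.upperChar a) = false :=
        beq_eq_false_iff_ne.mpr (Ne.symm h2)
      simp [pvReact, e1, e2]

theorem pvUpper_toNat (c : Char) (h : c.toNat ≤ 126) :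
    (PySem.Chars.upperChar c).toNat =
      if 97 ≤ c.toNat ∧ c.toNat ≤ 122 then c.toNat - 32 else c.toNat := by
  simp only [PySem.Chars.upperChar, PySem.Chars.islower]
  by_cases h1 : 97 ≤ c.toNat ∧ c.toNat ≤ 122
  · have ha : 'a' ≤ c := Char.le_def.mpr h1.1
    have hz : c ≤ 'z' := Char.le_def.mpr h1.2
    simp only [ha, hz, decide_true, Bool.and_self, if_pos, h1]
    simp [Char.toNat_ofNat, Nat.isValidChar]
    omega
  · have hn : ¬('a' ≤ c ∧ c ≤ 'z') := by
      intro ⟨x, y⟩; exact h1 ⟨Char.le_def.mp x, Char.le_def.mp y⟩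
    rcases Decidable.not_and_iff_not_or_not.mp hn with hx | hx <;> simp [hx, h1]

theorem pvChar_eq (a b : Char) (h : a.toNat = b.toNat) : a = b := by
  cases a; cases b
  simp only [Char.toNat] at h
  congr 1
  exact UInt32.toNat_inj.mp h

theorem pvAsciiLe (c : Char) (h : pvDomChar c = true) : c.toNat ≤ 126 := by
  simp [pvDomChar] at h
  omega

-- over ASCII, the case-partner of a character is unique: if t reacts with a and a reacts with b, t = b
theorem pvPartner (t a b : Char) (ht : t.toNat ≤ 126) (ha : a.toNat ≤ 126)
    (hb : b.toNat ≤ 126) (h1 : pvReact t a = true) (h2 : pvReact a b = true) : t = b := by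
  simp only [pvReact, bne, Bool.and_eq_true, Bool.not_eq_eq_eq_not, Bool.not_true,
    beq_eq_false_iff_ne, beq_iff_eq] at h1 h2
  obtain ⟨hta, huta⟩ := h1
  obtain ⟨hab, huab⟩ := h2
  apply pvChar_eq
  have e1 := congrArg Char.toNat huta
  have e2 := congrArg Char.toNat huab
  rw [pvUpper_toNat t ht, pvUpper_toNat a ha] at e1
  rw [pvUpper_toNat a ha, pvUpper_toNat b hb] at e2
  have nta : t.toNat ≠ a.toNat := fun e => hta (pvChar_eq _ _ e)
  have nab : a.toNat ≠ b.toNat := fun e => hab (pvChar_eq _ _ e)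
  split_ifs at e1 e2 <;> omega

-- the proof-side stack reduction (stack `s` with top at head; A's `next` is `s.reverse`)
def pvS : List Char → List Char → List Char
  | s, [] => s
  | [], c :: cs => pvS [c] cs
  | t :: s', c :: cs => if pvReact t c then pvS s' cs else pvS (c :: t :: s') cs

theorem pvS_length_le : ∀ (l s : List Char), (pvS s l).length ≤ s.length + l.length := by
  intro l
  induction l with
  | nil => intro s; simp [pvS]
  | cons c cs ih =>
    intro s
    match s with
    | [] =>
      have := ih [c]
      simp [pvS] at this ⊢
      omega
    | t :: s' =>
      rw [pvS]
      split
      · have := ih s'; simp at *; omega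
      · have := ih (c :: t :: s'); simp at *; omega

-- A's fold over the kept characters computes pvS, and its flag says "the stack lost length"
theorem pvFold_eq (exL : List Char) :
    ∀ (l : List Char) (r : Bool) (s : List Char), (∀ c ∈ l, (PySem.Chars.lower [c] == exL) = false) →
      l.foldl (fun (st : Bool × List Char) char =>
        if PySem.Chars.lower [char] == exL then st
        else
          match st.2.getLast? with
          | some last =>
            if last != char && (PySem.Chars.upperChar last == PySem.Chars.upperChar char) then
              (true, st.2.dropLast)
            else (st.1, st.2 ++ [char])
          | none => (st.1, st.2 ++ [char])) (r, s.reverse)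
      = ((r || decide ((pvS s l).length ≠ s.length + l.length)), (pvS s l).reverse) := by
  intro l
  induction l with
  | nil => intro r s _; simp [pvS]
  | cons c cs ih =>
    intro r s hk
    have hc := hk c (by simp)
    have hcs : ∀ x ∈ cs, (PySem.Chars.lower [x] == exL) = false :=
      fun x hx => hk x (by simp [hx])
    rw [List.foldl_cons]
    simp only [hc, Bool.false_eq_true, if_false]
    match s with
    | [] =>
      simp only [List.reverse_nil, List.getLast?_nil, List.nil_append]
      have hrec := ih r [c] hcs
      simp only [List.reverse_cons, List.reverse_nil, List.nil_append] at hrec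
      rw [hrec]
      have e : pvS [] (c :: cs) = pvS [c] cs := by rw [pvS]
      rw [e]
      simp only [Prod.mk.injEq, and_true]
      rw [show ([c] : List Char).length + cs.length
            = ([] : List Char).length + (c :: cs).length by simp; omega]
    | t :: s' =>
      have hrev : (t :: s').reverse.getLast? = some t := by
        rw [List.getLast?_reverse]; rfl
      simp only [hrev]
      by_cases hr : pvReact t c = true
      · have hrB : (t != c && (PySem.Chars.upperChar t == PySem.Chars.upperChar c)) = true := hr
        simp only [hrB, if_true]
        have hdrop : (t :: s').reverse.dropLast = s'.reverse := by
          rw [List.dropLast_reverse]; rfl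
        rw [hdrop, ih true s' hcs]
        have e : pvS (t :: s') (c :: cs) = pvS s' cs := by
          rw [pvS]; simp only [hr, if_true]
        rw [e]
        simp only [Prod.mk.injEq, and_true]
        have hle := pvS_length_le cs s'
        simp only [Bool.true_or]
        rw [eq_comm]
        simp only [Bool.or_eq_true, decide_eq_true_eq]
        right
        simp only [List.length_cons]
        omega
      · simp only [Bool.not_eq_true] at hr
        have hrB : (t != c && (PySem.Chars.upperChar t == PySem.Chars.upperChar c)) = false := hr
        simp only [hrB, Bool.false_eq_true, if_false]
        have happ : (t :: s').reverse ++ [c] = (c :: t :: s').reverse := by simp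
        rw [happ, ih r (c :: t :: s') hcs]
        have e : pvS (t :: s') (c :: cs) = pvS (c :: t :: s') cs := by
          rw [pvS, hr]; simp only [Bool.false_eq_true, if_false]
        rw [e]
        simp only [Prod.mk.injEq, and_true]
        rw [show (c :: t :: s').length + cs.length
              = (t :: s').length + (c :: cs).length by simp only [List.length_cons]; omega]

-- skipping the excluded characters inside the fold = folding over the filtered list
theorem pvFold_filter {α : Type} (exL : List Char) (f : α → Char → α)
    (hf : ∀ st c, (PySem.Chars.lower [c] == exL) = true → f st c = st) :
    ∀ (l : List Char) (st : α),
      l.foldl f st = (l.filter (fun c => PySem.Chars.lower [c] != exL)).foldl f st := by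
  intro l
  induction l with
  | nil => intro st; rfl
  | cons c cs ih =>
    intro st
    by_cases h : (PySem.Chars.lower [c] == exL) = true
    · rw [List.foldl_cons, hf st c h]
      have : (List.filter (fun c => PySem.Chars.lower [c] != exL) (c :: cs))
            = List.filter (fun c => PySem.Chars.lower [c] != exL) cs := by
        simp [bne, h]
      rw [this, ih]
    · have hb : (PySem.Chars.lower [c] != exL) = true := by simp [bne, h]
      rw [List.foldl_cons]
      have : (List.filter (fun c => PySem.Chars.lower [c] != exL) (c :: cs))
            = c :: List.filter (fun c => PySem.Chars.lower [c] != exL) cs := by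
        simp [hb]
      rw [this, List.foldl_cons, ih]

-- pvScan1 finds nothing exactly on pair-free lists
theorem pvScan1_none_iff : ∀ (l : List Char),
    pvScan1 l = none ↔ l.IsChain (fun a b => pvReact a b = false) := by
  intro l
  induction l with
  | nil => simp [pvScan1]
  | cons a tl ih =>
    match tl with
    | [] => simp [pvScan1]
    | b :: rest =>
      rw [pvScan1, List.isChain_cons_cons]
      by_cases hr : pvReact a b = true
      · have : (a != b && (PySem.Chars.upperChar a == PySem.Chars.upperChar b)) = true := hr
        simp [this, hr]
      · have hf : pvReact a b = false := by simpa using hr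
        have : (a != b && (PySem.Chars.upperChar a == PySem.Chars.upperChar b)) = false := hf
        simp only [this, Bool.false_eq_true, if_false, Option.map_eq_none_iff, hf, true_and]
        exact ih

theorem pvScan1_sublist : ∀ (l l' : List Char), pvScan1 l = some l' → l'.Sublist l := by
  intro l
  induction l with
  | nil => intro l' h; simp [pvScan1] at h
  | cons a tl ih =>
    intro l' h
    match tl with
    | [] => simp [pvScan1] at h
    | b :: rest =>
      rw [pvScan1] at h
      split at h
      · cases h
        exact (List.sublist_cons_self _ _).trans (List.sublist_cons_self _ _)
      · simp only [Option.map_eq_some_iff] at h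
        obtain ⟨m, hm, rfl⟩ := h
        exact (ih m hm).cons₂ a

-- on an already pair-free input the stack pass is the identity
theorem pvS_of_chain : ∀ (l s : List Char),
    (s.reverse ++ l).IsChain (fun a b => pvReact a b = false) → pvS s l = l.reverse ++ s := by
  intro l
  induction l with
  | nil => intro s _; simp [pvS]
  | cons c cs ih =>
    intro s h
    match s with
    | [] =>
      have : pvS [c] cs = cs.reverse ++ [c] := by
        apply ih
        simpa using h
      rw [pvS, this]
      simp
    | t :: s' =>
      have htc : pvReact t c = false := by
        rcases List.isChain_append.mp h with ⟨_, _, hlink⟩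
        have hlast : (t :: s').reverse.getLast? = some t := by
          rw [List.getLast?_reverse]; rfl
        exact hlink t hlast c rfl
      rw [pvS, htc]
      simp only [Bool.false_eq_true, if_false]
      have : pvS (c :: t :: s') cs = cs.reverse ++ (c :: t :: s') := by
        apply ih
        have : (c :: t :: s').reverse ++ cs = (t :: s').reverse ++ (c :: cs) := by simp
        rw [this]
        exact h
      rw [this]
      simp

-- KEY: removing the first reacting pair does not change the stack-reduction result
theorem pvS_scan1 : ∀ (l l' s : List Char), pvScan1 l = some l' →
    s.IsChain (fun a b => pvReact a b = false) →
    (∀ c ∈ s, c.toNat ≤ 126) → (∀ c ∈ l, c.toNat ≤ 126) →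
    pvS s l = pvS s l' := by
  intro l
  induction l with
  | nil => intro l' s h; simp [pvScan1] at h
  | cons a tl ih =>
    intro l' s h hch hs hl
    match tl with
    | [] => simp [pvScan1] at h
    | b :: rest =>
      rw [pvScan1] at h
      split at h
      · -- a and b react: l' = rest
        rename_i hab'
        have hab : pvReact a b = true := hab'
        cases h
        match s with
        | [] =>
          -- pvS [] (a::b::rest) = pvS [a] (b::rest); a,b react so pop: pvS [] rest
          rw [pvS, pvS, hab]
          simp
        | t :: s' =>
          by_cases hta : pvReact t a = true
          · -- a pops t; then b = t is pushed back
            have htb : t = b := pvPartner t a b (hs t (by simp)) (hl a (by simp)) (hl b (by simp)) hta hab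
            rw [pvS, hta]
            simp only [if_true]
            subst htb
            -- goal: pvS s' (t::rest) = pvS (t::s') rest
            match s' with
            | [] => rw [pvS]
            | u :: s'' =>
              have hut : pvReact u t = false := by
                have := List.isChain_cons_cons.mp hch
                rw [pvReact_comm]
                exact this.1
              rw [pvS, hut]
              simp
          · simp only [Bool.not_eq_true] at hta
            rw [pvS, hta]
            simp only [Bool.false_eq_true, if_false]
            -- goal: pvS (a :: t :: s') (b :: rest) = pvS (t :: s') rest
            rw [pvS, hab]
            simp
      · -- first pair is further right: pvScan1 (b::rest) = some m, l' = a :: m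
        simp only [Option.map_eq_some_iff] at h
        obtain ⟨m, hm, rfl⟩ := h
        have hlm : ∀ c ∈ b :: rest, c.toNat ≤ 126 := fun c hc => hl c (List.mem_cons_of_mem _ hc)
        have hmem : ∀ c ∈ m, c.toNat ≤ 126 := by
          intro c hc
          exact hlm c ((pvScan1_sublist _ _ hm).mem hc)
        match s with
        | [] =>
          rw [pvS]
          conv_rhs => rw [pvS]
          exact ih m [a] hm (by simp) (by intro x hx; rw [List.mem_singleton.mp hx]; exact hl a (by simp)) hlm
        | t :: s' =>
          by_cases hta : pvReact t a = true
          · rw [pvS, hta]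
            conv_rhs => rw [pvS, hta]
            simp only [if_true]
            exact ih m s' hm hch.tail (fun c hc => hs c (by simp [hc])) hlm
          · simp only [Bool.not_eq_true] at hta
            rw [pvS, hta]
            conv_rhs => rw [pvS, hta]
            simp only [Bool.false_eq_true, if_false]
            have hat : pvReact a t = false := by rw [pvReact_comm]; exact hta
            refine ih m (a :: t :: s') hm (List.isChain_cons_cons.mpr ⟨hat, hch⟩) ?_ hlm
            intro c hc
            simp only [List.mem_cons] at hc
            rcases hc with rfl | hc
            · exact hl c (by simp)
            · exact hs c (by simp [hc])

theorem pvLoop_fst_true : ∀ (l : List Char), (pvLoop true l).1 = true := by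
  intro l
  induction hn : l.length using Nat.strong_induction_on generalizing l with
  | _ n ih =>
    rw [pvLoop]
    split
    · rename_i nxt h
      subst hn
      exact ih nxt.length (by have := pvScan1_length l nxt h; omega) nxt rfl
    · rfl

theorem pvLoop_eq : ∀ (l : List Char), (∀ c ∈ l, c.toNat ≤ 126) →
    pvLoop false l = ((pvScan1 l).isSome, (pvS [] l).reverse) := by
  intro l
  induction hn : l.length using Nat.strong_induction_on generalizing l with
  | _ n ih =>
    subst hn
    rw [pvLoop]
    intro hd
    split
    · rename_i nxt h
      have hlen := pvScan1_length l nxt h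
      have hsub := pvScan1_sublist l nxt h
      have hdn : ∀ c ∈ nxt, c.toNat ≤ 126 := fun c hc => hd c (hsub.mem hc)
      have hrec := ih nxt.length (by omega) nxt rfl
      -- second component via the loop on nxt
      have h1 : (pvLoop true nxt).1 = true := pvLoop_fst_true nxt
      have h2 : (pvLoop true nxt).2 = (pvLoop false nxt).2 := by
        rw [pvLoop, pvLoop]
        split <;> rfl
      have hS : pvS [] nxt = pvS [] l :=
        (pvS_scan1 l nxt [] h (by simp) (by simp) hd).symm
      have : pvLoop true nxt = (true, (pvS [] l).reverse) := by
        apply Prod.ext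
        · exact h1
        · rw [h2, hrec hdn]
          simp [hS]
      rw [this, h]
      rfl
    · rename_i h
      have hch := (pvScan1_none_iff l).mp h
      have : pvS [] l = l.reverse := by
        have := pvS_of_chain l [] (by simpa using hch)
        simpa using this
      rw [h, this]
      simp

theorem pvFlag_eq (l : List Char) (hd : ∀ c ∈ l, c.toNat ≤ 126) :
    (pvScan1 l).isSome = decide ((pvS [] l).length ≠ 0 + l.length) := by
  cases h : pvScan1 l with
  | none =>
    have hch := (pvScan1_none_iff l).mp h
    have : pvS [] l = l.reverse := by
      have := pvS_of_chain l [] (by simpa using hch)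
      simpa using this
    simp [this]
  | some l' =>
    have hlen := pvScan1_length l l' h
    have hS : pvS [] l = pvS [] l' := pvS_scan1 l l' [] h (by simp) (by simp) hd
    have hle := pvS_length_le l' []
    simp only [Option.isSome_some, hS]
    rw [eq_comm]
    simp only [decide_eq_true_eq]
    simp at hle
    omega

-- ===== VERDICT (by name: the statement is the Claim_ definition above) =====
theorem make_pass_spec : Claim_equal_make_pass := by
  intro polymer exclude hdom
  unfold Spec_make_pass make_pass make_pass_alt
  simp only []
  have hdomP : ∀ c ∈ polymer.toList, c.toNat ≤ 126 := by
    simp only [Dom_make_pass, Bool.and_eq_true, pvDomStr, List.all_eq_true] at hdom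
    exact fun c hc => pvAsciiLe c (hdom.1 c hc)
  set exL := PySem.Chars.lower exclude.toList with hexL
  set kept := polymer.toList.filter (fun c => PySem.Chars.lower [c] != exL) with hkept
  have hkdom : ∀ c ∈ kept, c.toNat ≤ 126 := by
    intro c hc
    exact hdomP c (List.mem_of_mem_filter hc)
  have hknox : ∀ c ∈ kept, (PySem.Chars.lower [c] == exL) = false := by
    intro c hc
    have := List.of_mem_filter hc
    simpa [bne] using this
  -- A's fold: skip = filter, then pvS characterization
  have hfilter := pvFold_filter exL
    (fun (st : Bool × List Char) char =>
      if PySem.Chars.lower [char] == exL then st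
      else
        match st.2.getLast? with
        | some last =>
          if last != char && (PySem.Chars.upperChar last == PySem.Chars.upperChar char) then
            (true, st.2.dropLast)
          else (st.1, st.2 ++ [char])
        | none => (st.1, st.2 ++ [char]))
    (by intro st c h; simp [h]) polymer.toList ((false : Bool), ([] : List Char))
  have hfold := pvFold_eq exL kept false [] hknox
  simp only [List.reverse_nil] at hfold
  have hloop := pvLoop_eq kept hkdom
  have hflag := pvFlag_eq kept hkdom
  rw [hfilter, ← hkept, hfold, hloop, hflag]
  simp
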